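-- pv_equiv track=rewrite | github.com/sumnerevans/advent-of-code | 2020/17.py | grid_adjs
-- ===== SOURCE A (Python) =====
-- import itertools as it
-- from typing import Generator, Iterable, List, Tuple
--
-- def grid_adjs(
--     coord: Tuple[int, ...],
--     bounds: Tuple[Tuple[int, int], ...] = None,
--     inclusive: bool = True,
-- ) -> Generator[Tuple[int, ...], None, None]:
--     # Iterate through all of the deltas for the N dimensions of the coord. A delta is
--     # -1, 0, or 1 indicating that the adjacent cell is one lower, same level, or higher
--     # than the given coordinate.
--     for delta in it.product((-1, 0, 1), repeat=len(coord)):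
--         if all(d == 0 for d in delta):
--             # This is the coord itself, skip.
--             continue
--
--         # Check the bounds
--         if bounds is not None:
--             inbounds = True
--             for i, (d, (low, high)) in enumerate(zip(delta, bounds)):
--                 if inclusive and not (low <= coord[i] + d <= high):
--                     inbounds = False
--                     break
--                 elif not inclusive and not (low <= coord[i] + d <= high):
--                     inbounds = False
--                     break
--             if not inbounds:
--                 continue
--
--         yield tuple(c + d for c, d in zip(coord, delta))
-- ===== SOURCE B (Python) =====
-- def grid_adjs(coord, bounds=None, inclusive=True):
--     # Build neighbors recursively, dimension by dimension, pruning out-of-bounds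
--     # branches early; deepest dimension iterates fastest, matching product order.
--     def rec(cs, bs, prefix, allzero):
--         if not cs:
--             if not allzero:
--                 yield tuple(prefix)
--             return
--         c, rest = cs[0], cs[1:]
--         for d in (-1, 0, 1):
--             v = c + d
--             if bs and not (bs[0][0] <= v <= bs[0][1]):
--                 continue
--             yield from rec(rest, bs[1:], prefix + [v], allzero and d == 0)
--     yield from rec(list(coord), list(bounds) if bounds is not None else [], [], True)
-- ===== Notes on version B (the rewrite author's own statement) =====
-- stated objective: alternative
-- what changed: Replaces the flat iteration over the 3^N itertools.product of deltas (with an indexed inner bounds loop per candidate) by a recursive generator that builds each neighbor dimension by dimension, pruning an out-of-bounds delta as soon as it is chosen and skipping only the all-zero leaf.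
import Mathlib
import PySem

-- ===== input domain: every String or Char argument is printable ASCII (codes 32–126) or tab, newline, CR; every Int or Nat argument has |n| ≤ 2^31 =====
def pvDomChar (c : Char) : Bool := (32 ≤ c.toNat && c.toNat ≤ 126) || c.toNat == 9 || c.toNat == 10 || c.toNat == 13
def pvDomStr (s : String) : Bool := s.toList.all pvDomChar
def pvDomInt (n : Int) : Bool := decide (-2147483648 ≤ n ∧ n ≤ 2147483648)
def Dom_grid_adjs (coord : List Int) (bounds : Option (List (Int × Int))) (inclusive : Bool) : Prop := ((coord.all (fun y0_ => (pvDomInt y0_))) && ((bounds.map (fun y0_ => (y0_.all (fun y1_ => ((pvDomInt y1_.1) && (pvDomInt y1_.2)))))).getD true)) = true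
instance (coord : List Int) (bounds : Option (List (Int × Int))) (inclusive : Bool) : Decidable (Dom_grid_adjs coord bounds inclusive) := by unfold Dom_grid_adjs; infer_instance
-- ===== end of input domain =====

-- B builds the neighbour coordinates recursively, dimension by dimension, pruning
-- out-of-bounds branches per dimension, instead of filtering the flat 3^N product
-- of deltas; objective: alternative decomposition, same result list in the same order.

-- ===== PORT A =====
-- it.product((-1, 0, 1), repeat=n): first coordinate varies slowest
def pvProd3 : Nat → List (List Int)
  | 0 => [[]]
  | n + 1 => ([-1, 0, 1] : List Int).flatMap (fun d => (pvProd3 n).map (fun t => d :: t))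

-- the inner bounds loop: 'for i, (d, (low, high)) in enumerate(zip(delta, bounds))',
-- reading coord[i] (always in range at the call site since i < len(delta) = len(coord))
def pvInbGo (coord : List Int) (inclusive : Bool) : Nat → List (Int × (Int × Int)) → Bool
  | _, [] => true
  | i, (d, (low, high)) :: rest =>
    let c := (PySem.List.pyGet? coord (Int.ofNat i)).getD 0
    if inclusive && !(decide (low ≤ c + d) && decide (c + d ≤ high)) then false
    else if !inclusive && !(decide (low ≤ c + d) && decide (c + d ≤ high)) then false
    else pvInbGo coord inclusive (i + 1) rest

def grid_adjs (coord : List Int) (bounds : Option (List (Int × Int))) (inclusive : Bool) : List (List Int) :=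
  (pvProd3 coord.length).foldl (fun acc delta =>
    if delta.all (fun d => d == 0) then acc
    else
      match bounds with
      | some bs =>
        if pvInbGo coord inclusive 0 (delta.zip bs) then acc ++ [List.zipWith (· + ·) coord delta]
        else acc
      | none => acc ++ [List.zipWith (· + ·) coord delta]) []

-- ===== PORT B =====
def pvAltRec (cs : List Int) (bs : List (Int × Int)) (pre : List Int) (allzero : Bool) : List (List Int) :=
  match cs with
  | [] => if allzero then [] else [pre]
  | c :: rest =>
    ([-1, 0, 1] : List Int).foldl (fun acc d =>
      let v := c + d
      match bs with
      | (low, high) :: brest =>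
        if decide (low ≤ v) && decide (v ≤ high) then
          acc ++ pvAltRec rest brest (pre ++ [v]) (allzero && (d == 0))
        else acc
      | [] => acc ++ pvAltRec rest [] (pre ++ [v]) (allzero && (d == 0))) []

def grid_adjs_alt (coord : List Int) (bounds : Option (List (Int × Int))) (inclusive : Bool) : List (List Int) :=
  pvAltRec coord (bounds.getD []) [] true

-- ===== PRECONDITION & SPEC =====
def Spec_grid_adjs (coord : List Int) (bounds : Option (List (Int × Int))) (inclusive : Bool) (out : List (List Int)) : Prop := out = grid_adjs_alt coord bounds inclusive
instance (coord : List Int) (bounds : Option (List (Int × Int))) (inclusive : Bool) (out : List (List Int)) : Decidable (Spec_grid_adjs coord bounds inclusive out) := by unfold Spec_grid_adjs; infer_instance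

-- ===== CLAIM (what is proved, stated in full; the proofs are below) =====
def Claim_equal_grid_adjs : Prop := ∀ (coord : List Int) (bounds : Option (List (Int × Int))) (inclusive : Bool), Dom_grid_adjs coord bounds inclusive → Spec_grid_adjs coord bounds inclusive (grid_adjs coord bounds inclusive)

-- ===== LEMMAS AND PROOFS =====

-- common specification pieces: the bounds check as a conjunction over the whole delta,
-- and the one-or-zero-element emission per delta
def pvChk : List Int → List (Int × Int) → List Int → Bool
  | _, [], _ => true
  | [], _, _ => true
  | _, _, [] => true
  | c :: cs, (low, high) :: bs, d :: ds =>
    decide (low ≤ c + d) && decide (c + d ≤ high) && pvChk cs bs ds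

def pvEmit (cs : List Int) (bs : List (Int × Int)) (pre : List Int) (az : Bool) (δ : List Int) : List (List Int) :=
  if az && δ.all (fun d => d == 0) then []
  else if pvChk cs bs δ then [pre ++ List.zipWith (· + ·) cs δ] else []

theorem pvProd3_length {n : Nat} {δ : List Int} (h : δ ∈ pvProd3 n) : δ.length = n := by
  induction n generalizing δ with
  | zero => simp [pvProd3] at h; simp [h]
  | succ m ih =>
    simp only [pvProd3, List.mem_flatMap, List.mem_map] at h
    obtain ⟨d, _, t, ht, rfl⟩ := h
    simp [ih ht]

theorem pvEmit_cons (c : Int) (rest : List Int) (bs : List (Int × Int)) (pre : List Int)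
    (az : Bool) (d : Int) (δ' : List Int) :
    pvEmit (c :: rest) bs pre az (d :: δ') =
      (match bs with
       | [] => pvEmit rest [] (pre ++ [c + d]) (az && (d == 0)) δ'
       | (low, high) :: brest =>
         if decide (low ≤ c + d) && decide (c + d ≤ high) then
           pvEmit rest brest (pre ++ [c + d]) (az && (d == 0)) δ'
         else []) := by
  cases bs with
  | nil => simp [pvEmit, pvChk, Bool.and_assoc]
  | cons b brest =>
    obtain ⟨low, high⟩ := b
    by_cases hok : (decide (low ≤ c + d) && decide (c + d ≤ high)) = true
    · simp [pvEmit, pvChk, hok, Bool.and_assoc]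
    · simp [pvEmit, pvChk, hok]

theorem flatMap_congr_mem {α β : Type} {l : List α} {f g : α → List β}
    (h : ∀ x ∈ l, f x = g x) : l.flatMap f = l.flatMap g := by
  induction l with
  | nil => rfl
  | cons x xs ih =>
    simp only [List.flatMap_cons, h x (by simp)]
    rw [ih (fun y hy => h y (by simp [hy]))]

theorem pvAltRec_eq_flatMap (cs : List Int) : ∀ (bs : List (Int × Int)) (pre : List Int) (az : Bool),
    pvAltRec cs bs pre az = (pvProd3 cs.length).flatMap (pvEmit cs bs pre az) := by
  induction cs with
  | nil =>
    intro bs pre az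
    cases az <;> cases bs <;> simp [pvAltRec, pvProd3, pvEmit, pvChk]
  | cons c rest ih =>
    intro bs pre az
    have hX : ∀ d : Int,
        (match bs with
         | (low, high) :: brest =>
           if decide (low ≤ c + d) && decide (c + d ≤ high) then
             pvAltRec rest brest (pre ++ [c + d]) (az && (d == 0))
           else []
         | [] => pvAltRec rest [] (pre ++ [c + d]) (az && (d == 0)))
          = (pvProd3 rest.length).flatMap (fun δ' => pvEmit (c :: rest) bs pre az (d :: δ')) := by
      intro d
      cases bs with
      | nil =>
        rw [ih]
        exact flatMap_congr_mem (fun δ' _ => (pvEmit_cons c rest [] pre az d δ').symm)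
      | cons b brest =>
        obtain ⟨low, high⟩ := b
        by_cases hok : (decide (low ≤ c + d) && decide (c + d ≤ high)) = true
        · simp only [hok, if_true]
          rw [ih]
          refine flatMap_congr_mem (fun δ' _ => ?_)
          rw [pvEmit_cons]; simp [hok]
        · simp only [hok]
          have : ∀ δ' ∈ pvProd3 rest.length, pvEmit (c :: rest) ((low, high) :: brest) pre az (d :: δ') = [] := by
            intro δ' _
            rw [pvEmit_cons]; simp [hok]
          simp only [Bool.false_eq_true, if_false]
          rw [flatMap_congr_mem this]
          simp
    have hf : (fun (acc : List (List Int)) (d : Int) =>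
        match bs with
        | (low, high) :: brest =>
          if decide (low ≤ c + d) && decide (c + d ≤ high) then
            acc ++ pvAltRec rest brest (pre ++ [c + d]) (az && (d == 0))
          else acc
        | [] => acc ++ pvAltRec rest [] (pre ++ [c + d]) (az && (d == 0)))
        = (fun acc d => acc ++
            (match bs with
             | (low, high) :: brest =>
               if decide (low ≤ c + d) && decide (c + d ≤ high) then
                 pvAltRec rest brest (pre ++ [c + d]) (az && (d == 0))
               else []
             | [] => pvAltRec rest [] (pre ++ [c + d]) (az && (d == 0)))) := by
      funext acc d
      cases bs with
      | nil => rfl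
      | cons b brest =>
        obtain ⟨low, high⟩ := b
        by_cases hok : (decide (low ≤ c + d) && decide (c + d ≤ high)) = true <;> simp [hok]
    rw [show pvAltRec (c :: rest) bs pre az = List.foldl
        (fun (acc : List (List Int)) (d : Int) =>
          match bs with
          | (low, high) :: brest =>
            if decide (low ≤ c + d) && decide (c + d ≤ high) then
              acc ++ pvAltRec rest brest (pre ++ [c + d]) (az && (d == 0))
            else acc
          | [] => acc ++ pvAltRec rest [] (pre ++ [c + d]) (az && (d == 0)))
        [] ([-1, 0, 1] : List Int) from rfl]
    rw [hf, PySem.List.foldl_append_eq_flatMap]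
    simp only [List.nil_append, List.length_cons, pvProd3]
    rw [List.flatMap_assoc]
    refine flatMap_congr_mem (fun d _ => ?_)
    rw [List.flatMap_map]
    exact hX d

-- the A-side inner loop equals pvChk (index i reads the element at position i)
theorem pvInbGo_eq_chk (incl : Bool) : ∀ (δ : List Int) (bs : List (Int × Int))
    (cs1 cs2 : List Int), δ.length ≤ cs2.length →
    pvInbGo (cs1 ++ cs2) incl cs1.length (δ.zip bs) = pvChk cs2 bs δ := by
  intro δ
  induction δ with
  | nil =>
    intro bs cs1 cs2 _
    cases bs <;> cases cs2 <;> simp [pvInbGo, pvChk]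
  | cons d δ' ih =>
    intro bs cs1 cs2 hlen
    cases bs with
    | nil => cases cs2 <;> simp [pvInbGo, pvChk]
    | cons b brest =>
      obtain ⟨low, high⟩ := b
      cases cs2 with
      | nil => simp at hlen
      | cons c crest =>
        have hget : (PySem.List.pyGet? (cs1 ++ c :: crest) (Int.ofNat cs1.length)).getD 0 = c := by
          have := PySem.List.pyGet?_append_length (pre := cs1) (y := c) (ys := crest)
          simp only [Int.ofNat_eq_natCast]
          rw [this]; rfl
        have hrec : pvInbGo (cs1 ++ c :: crest) incl (cs1.length + 1) (δ'.zip brest)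
            = pvChk crest brest δ' := by
          have h2 : δ'.length ≤ crest.length := by simpa using hlen
          have := ih brest (cs1 ++ [c]) crest h2
          simpa [List.append_assoc] using this
        simp only [List.zip_cons_cons, pvInbGo, hget, pvChk]
        by_cases hok : (decide (low ≤ c + d) && decide (c + d ≤ high)) = true
        · cases incl <;> simp [hok, hrec]
        · cases incl <;> simp [hok]

-- the A-side foldl accumulates exactly the per-delta emissions
theorem grid_adjs_eq_flatMap (coord : List Int) (bounds : Option (List (Int × Int))) (incl : Bool) :
    grid_adjs coord bounds incl =
      (pvProd3 coord.length).flatMap (fun δ =>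
        if δ.all (fun d => d == 0) then []
        else
          match bounds with
          | some bs => if pvInbGo coord incl 0 (δ.zip bs) then [List.zipWith (· + ·) coord δ] else []
          | none => [List.zipWith (· + ·) coord δ]) := by
  show List.foldl _ [] _ = _
  have key : ∀ (l : List (List Int)) (a : List (List Int)),
      l.foldl (fun acc delta =>
        if delta.all (fun d => d == 0) then acc
        else
          match bounds with
          | some bs =>
            if pvInbGo coord incl 0 (delta.zip bs) then acc ++ [List.zipWith (· + ·) coord delta]
            else acc
          | none => acc ++ [List.zipWith (· + ·) coord delta]) a
      = a ++ l.flatMap (fun δ =>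
          if δ.all (fun d => d == 0) then []
          else
            match bounds with
            | some bs => if pvInbGo coord incl 0 (δ.zip bs) then [List.zipWith (· + ·) coord δ] else []
            | none => [List.zipWith (· + ·) coord δ]) := by
    intro l
    induction l with
    | nil => simp
    | cons δ rest ih =>
      intro a
      simp only [List.foldl_cons, List.flatMap_cons, ih]
      cases bounds with
      | none =>
        by_cases hz : (δ.all (fun d => d == 0)) = true <;> simp [hz, List.append_assoc]
      | some bs =>
        by_cases hz : (δ.all (fun d => d == 0)) = true
        · simp [hz]
        · by_cases hb : pvInbGo coord incl 0 (δ.zip bs) = true <;>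
            simp [hz, hb, List.append_assoc]
  simpa using key (pvProd3 coord.length) []

-- ===== VERDICT (by name: the statement is the Claim_ definition above) =====
theorem grid_adjs_spec : Claim_equal_grid_adjs := by
  intro coord bounds incl _
  show grid_adjs coord bounds incl = grid_adjs_alt coord bounds incl
  rw [grid_adjs_eq_flatMap]
  unfold grid_adjs_alt
  rw [pvAltRec_eq_flatMap]
  refine flatMap_congr_mem (fun δ hδ => ?_)
  have hlen : δ.length = coord.length := pvProd3_length hδ
  by_cases hz : (δ.all (fun d => d == 0)) = true
  · simp [hz, pvEmit]
  · cases bounds with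
    | none =>
      have hchk : pvChk coord [] δ = true := by cases coord <;> simp [pvChk]
      simp [hz, pvEmit, Option.getD, hchk]
    | some bs =>
      have := pvInbGo_eq_chk incl δ bs [] coord (by omega)
      simp only [List.nil_append, List.length_nil] at this
      simp [hz, pvEmit, Option.getD, this]
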